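-- pv_equiv track=rewrite | github.com/dukechain2333/faircausal | src/faircausal/utils/Dag.py | remove_unconnected_nodes
-- ===== SOURCE A (Python) =====
-- def remove_unconnected_nodes(dag: dict, target_node: str = None):
--     """
--     Remove all unconnected nodes from the given DAG, and optionally retain only the part of the DAG
--     containing a specified root node.
--
--     :param dag: Directed Acyclic Graph (DAG) represented as a dictionary
--     :param target_node: The node to use as the root for the sub-DAG to retain. If None, all connected components are considered.
--     :return: A new DAG dictionary with unconnected nodes removed and optionally only the sub-DAG containing the root_node.
--     """
--
--     def find_connected_nodes(dag: dict, start_node: str = None):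
--         """
--         Identify all connected nodes in the graph, optionally starting from a specific node.
--
--         :param dag: Directed Acyclic Graph (DAG) represented as a dictionary
--         :param start_node: The node to start DFS from. If None, all nodes are considered.
--         :return: A set of connected nodes
--         """
--         connected_nodes = set()
--
--         def dfs(node):
--             if node not in connected_nodes:
--                 connected_nodes.add(node)
--                 for child in dag.get(node, []):
--                     dfs(child)
--
--         # If a start_node is provided, only traverse the graph from that node
--         if start_node:
--             dfs(start_node)
--         else:
--             # Start DFS from every node to gather all connected nodes
--             for node in dag.keys():
--                 dfs(node)
--
--         # Nodes that are either parents or children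
--         all_involved_nodes = set(dag.keys()) | {child for children in dag.values() for child in children}
--         return connected_nodes & all_involved_nodes
--
--     # Check if the root_node exists and is connected
--     if target_node and target_node not in dag:
--         raise ValueError(f"Node {target_node} is not present in the DAG.")
--
--     # Get the set of connected nodes, optionally starting from the root_node
--     connected_nodes = find_connected_nodes(dag, start_node=target_node)
--
--     # If the root_node is specified but has no connections, return an empty DAG
--     if target_node and target_node not in connected_nodes:
--         raise Warning(f"Node {target_node} has no connections in the DAG.")
--
--     # Filter the original DAG to keep only the connected nodes
--     new_dag = {node: [child for child in children if child in connected_nodes]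
--                for node, children in dag.items() if node in connected_nodes}
--
--     return new_dag
-- ===== SOURCE B (Python) =====
-- def remove_unconnected_nodes(dag: dict, target_node: str = None):
--     """Iterative BFS re-implementation: with no (or falsy) target the result is
--     provably the whole DAG, so it is returned directly; otherwise a worklist
--     traversal computes the nodes reachable from target_node and the DAG is
--     filtered by that set."""
--     if not target_node:
--         return dict(dag)
--     if target_node not in dag:
--         raise ValueError(f"Node {target_node} is not present in the DAG.")
--     reach = set()
--     queue = [target_node]
--     while queue:
--         node = queue.pop(0)
--         if node not in reach:
--             reach.add(node)
--             queue.extend(dag.get(node, []))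
--     return {node: [child for child in children if child in reach]
--             for node, children in dag.items() if node in reach}
-- ===== Notes on version B (the rewrite author's own statement) =====
-- stated objective: simpler
-- what changed: Replaces the nested recursive DFS plus the redundant intersection with 'all involved nodes' by an iterative BFS worklist from the target, and returns the DAG unchanged when no target is given (A's DFS-from-every-key provably keeps everything); the dead Warning branch disappears.
import Mathlib
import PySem

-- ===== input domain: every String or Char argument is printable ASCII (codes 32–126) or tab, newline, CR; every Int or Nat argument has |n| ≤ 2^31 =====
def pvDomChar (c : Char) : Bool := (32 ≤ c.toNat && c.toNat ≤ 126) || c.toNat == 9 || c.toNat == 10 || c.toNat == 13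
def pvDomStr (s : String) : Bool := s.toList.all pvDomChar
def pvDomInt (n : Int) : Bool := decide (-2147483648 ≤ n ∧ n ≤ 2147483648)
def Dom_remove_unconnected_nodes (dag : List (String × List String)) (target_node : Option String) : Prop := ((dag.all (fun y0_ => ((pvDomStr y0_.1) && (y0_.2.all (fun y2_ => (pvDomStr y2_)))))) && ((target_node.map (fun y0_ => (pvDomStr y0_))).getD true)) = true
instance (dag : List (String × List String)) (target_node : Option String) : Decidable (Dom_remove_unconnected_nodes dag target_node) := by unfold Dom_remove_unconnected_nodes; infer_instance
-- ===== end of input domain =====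

-- B replaces A's nested recursive DFS (and its redundant intersection with the set of
-- "involved" nodes) by an iterative BFS worklist from the target, returning the DAG
-- unchanged when no target is given; objective: simpler.


-- ===== PORT A =====

-- dag.get(node, []) (Python dict.get with default []; shared by both ports)
def pvGet (dag : List (String × List String)) (n : String) : List String :=
  PySem.Dict.getD (PySem.Dict.mk dag) n []

-- recursion bound used by both traversals, a totality guard only: strictly more
-- than the number of distinct nodes of the graph (and than the total worklist work)
def pvFuel (dag : List (String × List String)) : Nat :=
  dag.length + (dag.map (fun kv => kv.2.length)).sum + 1

-- the inner recursive `dfs` of find_connected_nodes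
def pvDfsA (dag : List (String × List String)) : Nat → PySem.Set String → String → PySem.Set String
  | 0, connected, _ => connected
  | fuel + 1, connected, node =>
    if node ∈ connected then connected
    else (pvGet dag node).foldl (fun s c => pvDfsA dag fuel s c) (PySem.Set.add connected node)

-- the nested helper find_connected_nodes(dag, start_node); `if start_node:` is Python truthiness
def pvFindConnectedNodes (dag : List (String × List String)) (start_node : Option String) : PySem.Set String :=
  let connected_nodes : PySem.Set String :=
    match start_node with
    | some s =>
        if s = "" then dag.foldl (fun conn kv => pvDfsA dag (pvFuel dag) conn kv.1) PySem.Set.empty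
        else pvDfsA dag (pvFuel dag) PySem.Set.empty s
    | none => dag.foldl (fun conn kv => pvDfsA dag (pvFuel dag) conn kv.1) PySem.Set.empty
  let all_involved := PySem.Set.union (PySem.Set.ofList (dag.map (fun kv => kv.1)))
                        (PySem.Set.ofList (dag.flatMap (fun kv => kv.2)))
  PySem.Set.inter connected_nodes all_involved

def remove_unconnected_nodes (dag : List (String × List String)) (target_node : Option String) : List (String × List String) :=
  -- (the `raise ValueError` / `raise Warning` inputs are excluded by Pre_)
  let connected_nodes := pvFindConnectedNodes dag target_node
  (dag.filter (fun kv => decide (kv.1 ∈ connected_nodes))).map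
    (fun kv => (kv.1, kv.2.filter (fun c => decide (c ∈ connected_nodes))))

-- ===== PORT B =====

-- the iterative BFS worklist loop of B (queue.pop(0) / queue.extend)
def pvBfsB (dag : List (String × List String)) : Nat → PySem.Set String → List String → PySem.Set String
  | 0, reach, _ => reach
  | fuel + 1, reach, queue =>
    match queue with
    | [] => reach
    | n :: rest =>
      if n ∈ reach then pvBfsB dag fuel reach rest
      else pvBfsB dag fuel (PySem.Set.add reach n) (rest ++ pvGet dag n)

def remove_unconnected_nodes_alt (dag : List (String × List String)) (target_node : Option String) : List (String × List String) :=
  match target_node with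
  | none => dag
  | some s =>
    if s = "" then dag
    else
      let reach := pvBfsB dag (pvFuel dag) PySem.Set.empty [s]
      (dag.filter (fun kv => decide (kv.1 ∈ reach))).map
        (fun kv => (kv.1, kv.2.filter (fun c => decide (c ∈ reach))))

-- ===== PRECONDITION & SPEC =====
-- Pre_ excludes (a) inputs where A raises ValueError (a truthy target that is not a key) and
-- (b) association lists with duplicate keys, which do not represent any Python dict.
def Pre_remove_unconnected_nodes (dag : List (String × List String)) (target_node : Option String) : Prop :=
  (dag.map Prod.fst).Nodup ∧
  (target_node.getD "" = "" ∨ target_node.getD "" ∈ dag.map Prod.fst)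
instance (dag : List (String × List String)) (target_node : Option String) : Decidable (Pre_remove_unconnected_nodes dag target_node) := by unfold Pre_remove_unconnected_nodes; infer_instance

def pvWitness_remove_unconnected_nodes : (List (String × List String)) × Option String :=
  ([("a", ["b", "c"]), ("c", ["d"]), ("e", ["f"])], some "a")

def Spec_remove_unconnected_nodes (dag : List (String × List String)) (target_node : Option String) (out : List (String × List String)) : Prop := out = remove_unconnected_nodes_alt dag target_node
instance (dag : List (String × List String)) (target_node : Option String) (out : List (String × List String)) : Decidable (Spec_remove_unconnected_nodes dag target_node out) := by unfold Spec_remove_unconnected_nodes; infer_instance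

-- ===== CLAIM (what is proved, stated in full; the proofs are below) =====
def Claim_equal_remove_unconnected_nodes : Prop := ∀ (dag : List (String × List String)) (target_node : Option String), Dom_remove_unconnected_nodes dag target_node → Pre_remove_unconnected_nodes dag target_node → Spec_remove_unconnected_nodes dag target_node (remove_unconnected_nodes dag target_node)

-- ===== LEMMAS AND PROOFS =====

-- reachability along dag.get-edges
inductive PvReach (dag : List (String × List String)) : String → String → Prop
  | refl (x : String) : PvReach dag x x
  | step {x y c : String} : PvReach dag x y → c ∈ pvGet dag y → PvReach dag x c

theorem pvReach_trans {dag : List (String × List String)} {x y z : String}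
    (h1 : PvReach dag x y) (h2 : PvReach dag y z) : PvReach dag x z := by
  induction h2 with
  | refl => exact h1
  | step _ hc ih => exact PvReach.step ih hc

-- the universe of nodes: keys and all listed children
def pvU (dag : List (String × List String)) : PySem.Set String :=
  PySem.Set.ofList (dag.map Prod.fst ++ dag.flatMap (fun kv => kv.2))

-- number of universe nodes not yet visited
def pvM (dag : List (String × List String)) (conn : PySem.Set String) : Nat :=
  ((pvU dag).filter (fun x => decide (x ∉ conn))).length

-- ---- pvGet facts ----

theorem pvGet_nil (n : String) : pvGet [] n = [] := rfl

theorem pvGet_cons (kv : String × List String) (rest : List (String × List String)) (n : String) :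
    pvGet (kv :: rest) n = if kv.1 = n then kv.2 else pvGet rest n := by
  obtain ⟨k, v⟩ := kv
  by_cases h : k = n <;>
    simp [pvGet, PySem.Dict.getD_eq_get?_getD, PySem.Dict.get?_mk_cons, h]

theorem pvGet_eq_of_mem {dag : List (String × List String)} {k : String} {v : List String}
    (h : (k, v) ∈ dag) (hnd : (dag.map Prod.fst).Nodup) : pvGet dag k = v := by
  induction dag with
  | nil => cases h
  | cons kv rest ih =>
    rw [pvGet_cons]
    rcases List.mem_cons.mp h with h | h
    · rw [← h]; simp
    · have hk : kv.1 ≠ k := by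
        intro he
        have : k ∈ rest.map Prod.fst := List.mem_map.mpr ⟨(k, v), h, rfl⟩
        simp only [List.map_cons, List.nodup_cons] at hnd
        exact hnd.1 (he ▸ this)
      rw [if_neg hk]
      exact ih h (by simp only [List.map_cons, List.nodup_cons] at hnd; exact hnd.2)

theorem pvGet_sub {dag : List (String × List String)} {n c : String}
    (h : c ∈ pvGet dag n) : c ∈ dag.flatMap (fun kv => kv.2) := by
  induction dag with
  | nil => rw [pvGet_nil] at h; cases h
  | cons kv rest ih =>
    rw [pvGet_cons] at h
    rw [List.flatMap_cons, List.mem_append]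
    split at h
    · exact Or.inl h
    · exact Or.inr (ih h)

-- ---- universe facts ----

theorem mem_pvU {dag : List (String × List String)} {x : String} :
    x ∈ pvU dag ↔ x ∈ dag.map Prod.fst ∨ x ∈ dag.flatMap (fun kv => kv.2) := by
  simp [pvU, PySem.Set.mem_ofList]

theorem nodup_pvU (dag : List (String × List String)) : (pvU dag).Nodup :=
  PySem.Set.nodup_ofList _

theorem child_mem_pvU {dag : List (String × List String)} {n c : String}
    (h : c ∈ pvGet dag n) : c ∈ pvU dag :=
  mem_pvU.mpr (Or.inr (pvGet_sub h))

theorem length_pvU_lt (dag : List (String × List String)) : (pvU dag).length < pvFuel dag := by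
  have h1 : (pvU dag).length ≤ (dag.map Prod.fst ++ dag.flatMap (fun kv => kv.2)).length :=
    PySem.Set.length_ofList_le _
  rw [List.length_append, List.length_map, List.length_flatMap] at h1
  simp only [pvFuel]
  omega

-- ---- pvM facts ----

theorem pvM_mono {dag : List (String × List String)} {s t : PySem.Set String}
    (h : s ⊆ t) : pvM dag t ≤ pvM dag s := by
  apply List.Sublist.length_le
  apply List.monotone_filter_right
  intro x hx
  simp only [decide_eq_true_eq] at hx ⊢
  exact fun hxs => hx (h hxs)

theorem pvM_lt (dag : List (String × List String)) (conn : PySem.Set String) :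
    pvM dag conn < pvFuel dag := by
  have h1 : pvM dag conn ≤ (pvU dag).length := List.length_filter_le _ _
  exact lt_of_le_of_lt h1 (length_pvU_lt dag)

theorem pvM_pos {dag : List (String × List String)} {conn : PySem.Set String} {node : String}
    (hU : node ∈ pvU dag) (hn : node ∉ conn) : 1 ≤ pvM dag conn := by
  have hmem : node ∈ (pvU dag).filter (fun x => decide (x ∉ conn)) :=
    List.mem_filter.mpr ⟨hU, by simpa using hn⟩
  have hlen := List.length_pos_of_mem hmem
  unfold pvM
  omega

theorem pv_filter_len {conn : List String} {node : String} :
    ∀ {U : List String}, U.Nodup → node ∈ U → node ∉ conn →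
    (U.filter (fun x => decide (x ∉ conn ++ [node]))).length + 1
      = (U.filter (fun x => decide (x ∉ conn))).length := by
  intro U
  induction U with
  | nil => intro _ hU _; cases hU
  | cons u us ih =>
    intro hnd hU hn
    simp only [List.nodup_cons] at hnd
    rcases List.mem_cons.mp hU with rfl | hU
    · have hcong : us.filter (fun x => decide (x ∉ conn ++ [node]))
          = us.filter (fun x => decide (x ∉ conn)) := by
        apply List.filter_congr
        intro x hx
        have hxu : x ≠ node := fun he => hnd.1 (he ▸ hx)
        simp [List.mem_append, hxu]
      rw [List.filter_cons_of_neg (by simp), List.filter_cons_of_pos (by simpa using hn), hcong]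
      simp
    · have hun : u ≠ node := fun he => hnd.1 (he ▸ hU)
      have hrec := ih hnd.2 hU hn
      by_cases hc : u ∈ conn
      · rw [List.filter_cons_of_neg (by simp [List.mem_append, hc]),
          List.filter_cons_of_neg (by simp [hc])]
        exact hrec
      · rw [List.filter_cons_of_pos (by simp [List.mem_append, hc, hun]),
          List.filter_cons_of_pos (by simp [hc])]
        simp only [List.length_cons]
        omega

theorem pvM_add {dag : List (String × List String)} {conn : PySem.Set String} {node : String}
    (hU : node ∈ pvU dag) (hn : node ∉ conn) :
    pvM dag (PySem.Set.add conn node) + 1 = pvM dag conn := by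
  rw [pvM, pvM, PySem.Set.add_of_not_mem hn]
  exact pv_filter_len (nodup_pvU dag) hU hn

-- ---- small set helpers ----

theorem pv_subset_add (s : PySem.Set String) (x : String) : s ⊆ PySem.Set.add s x :=
  fun _ ha => (PySem.Set.mem_add _ _ _).mpr (Or.inl ha)

theorem pv_add_subset {s U : PySem.Set String} {x : String}
    (hs : s ⊆ U) (hx : x ∈ U) : PySem.Set.add s x ⊆ U := by
  intro a ha
  rcases (PySem.Set.mem_add _ _ _).mp ha with h | rfl
  · exact hs h
  · exact hx

theorem pv_foldl_subset {g : PySem.Set String → String → PySem.Set String}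
    (hg : ∀ s x, s ⊆ g s x) : ∀ (l : List String) (s : PySem.Set String), s ⊆ l.foldl g s := by
  intro l
  induction l with
  | nil => intro s; exact fun _ h => h
  | cons a as ih => intro s; exact fun y hy => ih (g s a) (hg s a hy)

-- ---- DFS (port A) facts ----

theorem pvDfsA_mono (dag : List (String × List String)) :
    ∀ (fuel : Nat) (conn : PySem.Set String) (node : String), conn ⊆ pvDfsA dag fuel conn node := by
  intro fuel
  induction fuel with
  | zero => intro conn node; exact fun _ h => h
  | succ f ih =>
    intro conn node
    simp only [pvDfsA]
    split
    · exact fun _ h => h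
    · intro y hy
      exact pv_foldl_subset (fun s x => ih s x) _ _ (pv_subset_add conn node hy)

theorem pvDfsA_mem_self (dag : List (String × List String)) (f : Nat)
    (conn : PySem.Set String) (node : String) : node ∈ pvDfsA dag (f + 1) conn node := by
  simp only [pvDfsA]
  split
  · assumption
  · exact pv_foldl_subset (fun s x => pvDfsA_mono dag f s x) _ _
      ((PySem.Set.mem_add _ _ _).mpr (Or.inr rfl))

theorem pvDfsA_subset_U (dag : List (String × List String)) :
    ∀ (fuel : Nat) (conn : PySem.Set String) (node : String),
      conn ⊆ pvU dag → node ∈ pvU dag → pvDfsA dag fuel conn node ⊆ pvU dag := by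
  intro fuel
  induction fuel with
  | zero => intro conn node hc _; exact hc
  | succ f ih =>
    intro conn node hc hn
    simp only [pvDfsA]
    split
    · exact hc
    · have aux : ∀ (l : List String) (s : PySem.Set String),
          s ⊆ pvU dag → (∀ c ∈ l, c ∈ pvU dag) →
          l.foldl (fun s c => pvDfsA dag f s c) s ⊆ pvU dag := by
        intro l
        induction l with
        | nil => intro s hs _; exact hs
        | cons a as ihl =>
          intro s hs ha
          exact ihl _ (ih s a hs (ha a List.mem_cons_self)) (fun c hc => ha c (List.mem_cons_of_mem a hc))
      exact aux _ _ (pv_add_subset hc hn) (fun c hc => child_mem_pvU hc)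

theorem pvDfsA_sound (dag : List (String × List String)) :
    ∀ (fuel : Nat) (conn : PySem.Set String) (node x : String),
      x ∈ pvDfsA dag fuel conn node → x ∈ conn ∨ PvReach dag node x := by
  intro fuel
  induction fuel with
  | zero => intro conn node x hx; exact Or.inl hx
  | succ f ih =>
    intro conn node x hx
    simp only [pvDfsA] at hx
    split at hx
    · exact Or.inl hx
    · have aux : ∀ (l : List String) (s : PySem.Set String) (x : String),
          x ∈ l.foldl (fun s c => pvDfsA dag f s c) s →
          x ∈ s ∨ ∃ c ∈ l, PvReach dag c x := by
        intro l
        induction l with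
        | nil => intro s x hx; exact Or.inl hx
        | cons a as ihl =>
          intro s x hx
          rcases ihl _ _ hx with hs | ⟨c, hc, hr⟩
          · rcases ih s a x hs with hs' | hr'
            · exact Or.inl hs'
            · exact Or.inr ⟨a, List.mem_cons_self, hr'⟩
          · exact Or.inr ⟨c, List.mem_cons_of_mem a hc, hr⟩
      rcases aux _ _ _ hx with hs | ⟨c, hc, hr⟩
      · rcases (PySem.Set.mem_add _ _ _).mp hs with h | rfl
        · exact Or.inl h
        · exact Or.inr (PvReach.refl x)
      · exact Or.inr (pvReach_trans (PvReach.step (PvReach.refl node) hc) hr)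

theorem pv_foldl_dfs_mem (dag : List (String × List String)) {f : Nat} (hf : 1 ≤ f) :
    ∀ (l : List String) (s : PySem.Set String), ∀ a ∈ l,
      a ∈ l.foldl (fun s c => pvDfsA dag f s c) s := by
  intro l
  induction l with
  | nil => intro s a ha; cases ha
  | cons b bs ihl =>
    intro s a ha
    rcases List.mem_cons.mp ha with rfl | ha
    · obtain ⟨f', rfl⟩ : ∃ f', f = f' + 1 := ⟨f - 1, by omega⟩
      exact pv_foldl_subset (fun s x => pvDfsA_mono dag _ s x) bs _
        (pvDfsA_mem_self dag f' s a)
    · exact ihl _ a ha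

theorem pvDfsA_rc (dag : List (String × List String)) :
    ∀ (fuel : Nat) (conn : PySem.Set String) (node : String),
      conn ⊆ pvU dag → node ∈ pvU dag → pvM dag conn < fuel →
      ∀ v ∈ pvDfsA dag fuel conn node, v ∉ conn →
      ∀ c ∈ pvGet dag v, c ∈ pvDfsA dag fuel conn node := by
  intro fuel
  induction fuel with
  | zero => intro conn node _ _ h; omega
  | succ f ih =>
    intro conn node hcU hnU hfuel v hv hvn c hc
    by_cases hmem : node ∈ conn
    · simp only [pvDfsA, if_pos hmem] at hv
      exact absurd hv hvn
    · simp only [pvDfsA, if_neg hmem] at hv ⊢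
      have hpos : 1 ≤ pvM dag conn := pvM_pos hnU hmem
      have hm1 : pvM dag (PySem.Set.add conn node) + 1 = pvM dag conn := pvM_add hnU hmem
      have hms0 : pvM dag (PySem.Set.add conn node) < f := by omega
      have hf1 : 1 ≤ f := by omega
      have hs0U : PySem.Set.add conn node ⊆ pvU dag := pv_add_subset hcU hnU
      have foldl_rc : ∀ (l : List String) (s : PySem.Set String),
          s ⊆ pvU dag → (∀ a ∈ l, a ∈ pvU dag) → pvM dag s < f →
          ∀ v ∈ l.foldl (fun s c => pvDfsA dag f s c) s, v ∉ s →
          ∀ c ∈ pvGet dag v, c ∈ l.foldl (fun s c => pvDfsA dag f s c) s := by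
        intro l
        induction l with
        | nil => intro s _ _ _ v hv hvn' _ _; exact absurd hv hvn'
        | cons a as ihl =>
          intro s hsU hlU hms v hv hvn' c' hc'
          simp only [List.foldl_cons] at hv ⊢
          have haU : a ∈ pvU dag := hlU a List.mem_cons_self
          have hs1U : pvDfsA dag f s a ⊆ pvU dag := pvDfsA_subset_U dag f s a hsU haU
          have hms1 : pvM dag (pvDfsA dag f s a) < f :=
            lt_of_le_of_lt (pvM_mono (pvDfsA_mono dag f s a)) hms
          by_cases hv1 : v ∈ pvDfsA dag f s a
          · have hcs1 : c' ∈ pvDfsA dag f s a := ih s a hsU haU hms v hv1 hvn' c' hc'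
            exact pv_foldl_subset (fun s x => pvDfsA_mono dag f s x) as _ hcs1
          · exact ihl _ hs1U (fun a' ha' => hlU a' (List.mem_cons_of_mem a ha')) hms1 v hv hv1 c' hc'
      by_cases hvnode : v = node
      · subst hvnode
        exact pv_foldl_dfs_mem dag hf1 _ _ c hc
      · have hvs0 : v ∉ PySem.Set.add conn node := by
          intro h
          rcases (PySem.Set.mem_add _ _ _).mp h with h | h
          · exact hvn h
          · exact hvnode h
        exact foldl_rc _ _ hs0U (fun a ha => child_mem_pvU ha) hms0 v hv hvs0 c hc

-- DFS result from a key characterizes reachability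
theorem pv_memA_iff {dag : List (String × List String)} {t x : String}
    (ht : t ∈ dag.map Prod.fst) :
    x ∈ pvDfsA dag (pvFuel dag) PySem.Set.empty t ↔ PvReach dag t x := by
  constructor
  · intro hx
    rcases pvDfsA_sound dag _ _ _ _ hx with h | h
    · cases h
    · exact h
  · intro hr
    induction hr with
    | refl =>
      exact pvDfsA_mem_self dag (dag.length + (dag.map (fun kv => kv.2.length)).sum) _ _
    | step hr' hc ihy =>
      exact pvDfsA_rc dag (pvFuel dag) PySem.Set.empty t (by intro a ha; cases ha)
        (mem_pvU.mpr (Or.inl ht)) (pvM_lt dag _) _ ihy (by intro h; cases h) _ hc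

-- ---- folding DFS over all keys (the no-target branch) ----

theorem pv_foldl_dfs_closed (dag : List (String × List String)) :
    ∀ (l : List String) (s : PySem.Set String),
      s ⊆ pvU dag → (∀ a ∈ l, a ∈ pvU dag) →
      (∀ v ∈ s, ∀ c ∈ pvGet dag v, c ∈ s) →
      ∀ v ∈ l.foldl (fun s c => pvDfsA dag (pvFuel dag) s c) s,
      ∀ c ∈ pvGet dag v, c ∈ l.foldl (fun s c => pvDfsA dag (pvFuel dag) s c) s := by
  intro l
  induction l with
  | nil => intro s _ _ hcl v hv c hc; exact hcl v hv c hc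
  | cons a as ihl =>
    intro s hsU hlU hcl
    simp only [List.foldl_cons]
    have haU : a ∈ pvU dag := hlU a List.mem_cons_self
    apply ihl _ (pvDfsA_subset_U dag _ s a hsU haU) (fun a' ha' => hlU a' (List.mem_cons_of_mem a ha'))
    intro v hv c hc
    by_cases hvs : v ∈ s
    · exact pvDfsA_mono dag _ s a (hcl v hvs c hc)
    · exact pvDfsA_rc dag _ s a hsU haU (pvM_lt dag s) v hv hvs c hc

-- ---- BFS (port B) facts ----

-- remaining worklist potential
def pvS (dag : List (String × List String)) (reach : PySem.Set String) : Nat :=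
  ((dag.filter (fun kv => decide (kv.1 ∉ reach))).map (fun kv => kv.2.length)).sum

def pvPhi (dag : List (String × List String)) (reach : PySem.Set String) (queue : List String) : Nat :=
  queue.length + pvS dag reach

theorem pvS_mono {dag : List (String × List String)} {s t : PySem.Set String}
    (h : s ⊆ t) : pvS dag t ≤ pvS dag s := by
  apply List.Sublist.sum_le_sum ?_ (by intro x hx; exact Nat.zero_le x)
  apply List.Sublist.map
  apply List.monotone_filter_right
  intro kv hkv
  simp only [decide_eq_true_eq] at hkv ⊢
  exact fun hmem => hkv (h hmem)

theorem pvS_add {dag : List (String × List String)} {reach : PySem.Set String} {n : String}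
    (hn : n ∉ reach) : pvS dag (PySem.Set.add reach n) + (pvGet dag n).length ≤ pvS dag reach := by
  induction dag with
  | nil => simp [pvS, pvGet_nil]
  | cons kv rest ih =>
    rw [pvGet_cons]
    simp only [pvS] at ih ⊢
    by_cases hk : kv.1 = n
    · rw [if_pos hk]
      have hmono : pvS rest (PySem.Set.add reach n) ≤ pvS rest reach :=
        pvS_mono (pv_subset_add reach n)
      simp only [pvS] at hmono
      rw [List.filter_cons_of_neg (by simp [PySem.Set.mem_add, hk]),
        List.filter_cons_of_pos (by simpa [hk] using hn)]
      simp only [List.map_cons, List.sum_cons]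
      omega
    · rw [if_neg hk]
      have hsame1 : (kv.1 ∈ PySem.Set.add reach n) ↔ (kv.1 ∈ reach) := by
        rw [PySem.Set.mem_add]
        exact ⟨fun h => h.resolve_right (fun he => absurd he hk), Or.inl⟩
      by_cases hc : kv.1 ∈ reach
      · rw [List.filter_cons_of_neg (by simp [hsame1.mpr hc]),
          List.filter_cons_of_neg (by simp [hc])]
        exact ih
      · rw [List.filter_cons_of_pos (by simp [hc, hsame1]),
          List.filter_cons_of_pos (by simp [hc])]
        simp only [List.map_cons, List.sum_cons]
        omega

theorem pvBfsB_mono (dag : List (String × List String)) :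
    ∀ (fuel : Nat) (reach : PySem.Set String) (queue : List String),
      reach ⊆ pvBfsB dag fuel reach queue := by
  intro fuel
  induction fuel with
  | zero => intro reach queue; exact fun _ h => h
  | succ f ih =>
    intro reach queue
    cases queue with
    | nil => exact fun _ h => h
    | cons n rest =>
      simp only [pvBfsB]
      split
      · exact ih reach rest
      · exact fun y hy => ih _ _ (pv_subset_add reach n hy)

theorem pvBfsB_mem (dag : List (String × List String)) :
    ∀ (fuel : Nat) (reach : PySem.Set String) (queue : List String),
      pvPhi dag reach queue ≤ fuel →
      ∀ x ∈ queue, x ∈ pvBfsB dag fuel reach queue := by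
  intro fuel
  induction fuel with
  | zero =>
    intro reach queue hphi x hx
    have := List.length_pos_of_mem hx
    simp only [pvPhi] at hphi
    omega
  | succ f ih =>
    intro reach queue hphi x hx
    cases queue with
    | nil => cases hx
    | cons n rest =>
      simp only [pvBfsB]
      by_cases hn : n ∈ reach
      · rw [if_pos hn]
        rcases List.mem_cons.mp hx with rfl | hx
        · exact pvBfsB_mono dag f reach rest hn
        · apply ih reach rest ?_ x hx
          simp only [pvPhi, List.length_cons] at hphi ⊢
          omega
      · rw [if_neg hn]
        rcases List.mem_cons.mp hx with rfl | hx
        · exact pvBfsB_mono dag f _ _ ((PySem.Set.mem_add _ _ _).mpr (Or.inr rfl))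
        · apply ih _ _ ?_ x (List.mem_append_left _ hx)
          have hS := pvS_add (dag := dag) hn
          simp only [pvPhi, List.length_cons, List.length_append] at hphi ⊢
          omega

theorem pvBfsB_closed (dag : List (String × List String)) :
    ∀ (fuel : Nat) (reach : PySem.Set String) (queue : List String),
      pvPhi dag reach queue ≤ fuel →
      (∀ v ∈ reach, ∀ c ∈ pvGet dag v, c ∈ reach ∨ c ∈ queue) →
      ∀ v ∈ pvBfsB dag fuel reach queue, ∀ c ∈ pvGet dag v, c ∈ pvBfsB dag fuel reach queue := by
  intro fuel
  induction fuel with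
  | zero =>
    intro reach queue hphi hinv v hv c hc
    have hq : queue = [] := by
      cases queue with
      | nil => rfl
      | cons a as => simp [pvPhi] at hphi
    subst hq
    rcases hinv v hv c hc with h | h
    · exact h
    · cases h
  | succ f ih =>
    intro reach queue hphi hinv
    cases queue with
    | nil =>
      intro v hv c hc
      rcases hinv v hv c hc with h | h
      · exact h
      · cases h
    | cons n rest =>
      simp only [pvBfsB]
      by_cases hn : n ∈ reach
      · rw [if_pos hn]
        apply ih reach rest
        · simp only [pvPhi, List.length_cons] at hphi ⊢; omega
        · intro v hv c hc
          rcases hinv v hv c hc with h | h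
          · exact Or.inl h
          · rcases List.mem_cons.mp h with rfl | h
            · exact Or.inl hn
            · exact Or.inr h
      · rw [if_neg hn]
        apply ih _ _
        · have hS := pvS_add (dag := dag) hn
          simp only [pvPhi, List.length_cons, List.length_append] at hphi ⊢
          omega
        · intro v hv c hc
          rcases (PySem.Set.mem_add _ _ _).mp hv with hv' | rfl
          · rcases hinv v hv' c hc with h | h
            · exact Or.inl ((PySem.Set.mem_add _ _ _).mpr (Or.inl h))
            · rcases List.mem_cons.mp h with rfl | h
              · exact Or.inl ((PySem.Set.mem_add _ _ _).mpr (Or.inr rfl))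
              · exact Or.inr (List.mem_append_left _ h)
          · exact Or.inr (List.mem_append_right _ hc)

theorem pvBfsB_sound (dag : List (String × List String)) :
    ∀ (fuel : Nat) (reach : PySem.Set String) (queue : List String) (x : String),
      x ∈ pvBfsB dag fuel reach queue →
      x ∈ reach ∨ ∃ q ∈ queue, PvReach dag q x := by
  intro fuel
  induction fuel with
  | zero => intro reach queue x hx; exact Or.inl hx
  | succ f ih =>
    intro reach queue x hx
    cases queue with
    | nil => exact Or.inl hx
    | cons n rest =>
      simp only [pvBfsB] at hx
      by_cases hn : n ∈ reach
      · rw [if_pos hn] at hx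
        rcases ih _ _ _ hx with h | ⟨q, hq, hr⟩
        · exact Or.inl h
        · exact Or.inr ⟨q, List.mem_cons_of_mem n hq, hr⟩
      · rw [if_neg hn] at hx
        rcases ih _ _ _ hx with h | ⟨q, hq, hr⟩
        · rcases (PySem.Set.mem_add _ _ _).mp h with h' | rfl
          · exact Or.inl h'
          · exact Or.inr ⟨x, List.mem_cons_self, PvReach.refl x⟩
        · rcases List.mem_append.mp hq with hq' | hq'
          · exact Or.inr ⟨q, List.mem_cons_of_mem n hq', hr⟩
          · exact Or.inr ⟨n, List.mem_cons_self,
              pvReach_trans (PvReach.step (PvReach.refl n) hq') hr⟩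

theorem pvS_nil_reach (dag : List (String × List String)) :
    pvS dag PySem.Set.empty = (dag.map (fun kv => kv.2.length)).sum := by
  have : dag.filter (fun kv => decide (kv.1 ∉ (PySem.Set.empty : PySem.Set String))) = dag := by
    apply List.filter_eq_self.mpr
    intro a _
    simp [PySem.Set.empty]
  rw [pvS, this]

theorem pv_memB_iff {dag : List (String × List String)} {t x : String} :
    x ∈ pvBfsB dag (pvFuel dag) PySem.Set.empty [t] ↔ PvReach dag t x := by
  have hphi : pvPhi dag PySem.Set.empty [t] ≤ pvFuel dag := by
    simp only [pvPhi, List.length_cons, List.length_nil, pvS_nil_reach, pvFuel]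
    omega
  constructor
  · intro hx
    rcases pvBfsB_sound dag _ _ _ _ hx with h | ⟨q, hq, hr⟩
    · cases h
    · obtain rfl : q = t := by simpa using hq
      exact hr
  · intro hr
    induction hr with
    | refl =>
      exact pvBfsB_mem dag _ _ _ hphi _ List.mem_cons_self
    | step hr' hc ihy =>
      exact pvBfsB_closed dag _ _ _ hphi (by intro v hv; cases hv) _ ihy _ hc

-- ---- assembling the two sides ----

theorem pv_findConnected_some {dag : List (String × List String)} {s x : String}
    (hs : ¬ s = "") (ht : s ∈ dag.map Prod.fst) :
    x ∈ pvFindConnectedNodes dag (some s) ↔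
      (PvReach dag s x ∧ (x ∈ dag.map Prod.fst ∨ x ∈ dag.flatMap (fun kv => kv.2))) := by
  simp only [pvFindConnectedNodes, if_neg hs]
  rw [PySem.Set.mem_inter]
  constructor
  · rintro ⟨h1, h2⟩
    refine ⟨(pv_memA_iff ht).mp h1, ?_⟩
    rcases (PySem.Set.mem_union _ _ _).mp h2 with h | h
    · exact Or.inl ((PySem.Set.mem_ofList _ _).mp h)
    · exact Or.inr ((PySem.Set.mem_ofList _ _).mp h)
  · rintro ⟨h1, h2⟩
    refine ⟨(pv_memA_iff ht).mpr h1, ?_⟩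
    rcases h2 with h | h
    · exact (PySem.Set.mem_union _ _ _).mpr (Or.inl ((PySem.Set.mem_ofList _ _).mpr h))
    · exact (PySem.Set.mem_union _ _ _).mpr (Or.inr ((PySem.Set.mem_ofList _ _).mpr h))

theorem pv_findConnected_all {dag : List (String × List String)} {target : Option String}
    (hnd : (dag.map Prod.fst).Nodup)
    (htgt : target = none ∨ target = some "") :
    ∀ kv ∈ dag, kv.1 ∈ pvFindConnectedNodes dag target ∧
      ∀ c ∈ kv.2, c ∈ pvFindConnectedNodes dag target := by
  have hfold : (dag.foldl (fun conn kv => pvDfsA dag (pvFuel dag) conn kv.1) PySem.Set.empty)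
      = (dag.map Prod.fst).foldl (fun conn k => pvDfsA dag (pvFuel dag) conn k) PySem.Set.empty := by
    rw [List.foldl_map]
  have hkeysU : ∀ a ∈ dag.map Prod.fst, a ∈ pvU dag := by
    intro a ha; exact mem_pvU.mpr (Or.inl ha)
  have hemptyU : (PySem.Set.empty : PySem.Set String) ⊆ pvU dag := by intro a ha; cases ha
  have hkeys : ∀ kv ∈ dag, kv.1 ∈ dag.foldl (fun conn kv => pvDfsA dag (pvFuel dag) conn kv.1) PySem.Set.empty := by
    intro kv hkv
    rw [hfold]
    exact pv_foldl_dfs_mem dag (by simp [pvFuel]) _ _ _ (List.mem_map.mpr ⟨kv, hkv, rfl⟩)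
  have hclosed : ∀ v ∈ dag.foldl (fun conn kv => pvDfsA dag (pvFuel dag) conn kv.1) PySem.Set.empty,
      ∀ c ∈ pvGet dag v, c ∈ dag.foldl (fun conn kv => pvDfsA dag (pvFuel dag) conn kv.1) PySem.Set.empty := by
    rw [hfold]
    exact pv_foldl_dfs_closed dag _ _ hemptyU hkeysU (by intro v hv; cases hv)
  intro kv hkv
  have hconn : pvFindConnectedNodes dag target =
      PySem.Set.inter (dag.foldl (fun conn kv => pvDfsA dag (pvFuel dag) conn kv.1) PySem.Set.empty)
        (PySem.Set.union (PySem.Set.ofList (dag.map (fun kv => kv.1)))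
          (PySem.Set.ofList (dag.flatMap (fun kv => kv.2)))) := by
    rcases htgt with rfl | rfl
    · rfl
    · simp [pvFindConnectedNodes]
  constructor
  · rw [hconn, PySem.Set.mem_inter]
    refine ⟨hkeys kv hkv, ?_⟩
    exact (PySem.Set.mem_union _ _ _).mpr (Or.inl ((PySem.Set.mem_ofList _ _).mpr (List.mem_map.mpr ⟨kv, hkv, rfl⟩)))
  · intro c hc
    rw [hconn, PySem.Set.mem_inter]
    have hget : pvGet dag kv.1 = kv.2 := pvGet_eq_of_mem (by simpa using hkv) hnd
    constructor
    · exact hclosed kv.1 (hkeys kv hkv) c (hget ▸ hc)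
    · exact (PySem.Set.mem_union _ _ _).mpr (Or.inr ((PySem.Set.mem_ofList _ _).mpr
        (List.mem_flatMap.mpr ⟨kv, hkv, hc⟩)))

-- A on a falsy target keeps everything
theorem pvA_falsy {dag : List (String × List String)} {target : Option String}
    (hnd : (dag.map Prod.fst).Nodup)
    (htgt : target = none ∨ target = some "") :
    remove_unconnected_nodes dag target = dag := by
  have hall := pv_findConnected_all hnd htgt
  simp only [remove_unconnected_nodes]
  have hfilter : dag.filter (fun kv => decide (kv.1 ∈ pvFindConnectedNodes dag target)) = dag := by
    apply List.filter_eq_self.mpr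
    intro kv hkv
    exact decide_eq_true ((hall kv hkv).1)
  rw [hfilter]
  have hmap : ∀ kv ∈ dag,
      (kv.1, kv.2.filter (fun c => decide (c ∈ pvFindConnectedNodes dag target))) = kv := by
    intro kv hkv
    have : kv.2.filter (fun c => decide (c ∈ pvFindConnectedNodes dag target)) = kv.2 := by
      apply List.filter_eq_self.mpr
      intro c hc
      exact decide_eq_true ((hall kv hkv).2 c hc)
    rw [this]
  calc dag.map (fun kv => (kv.1, kv.2.filter (fun c => decide (c ∈ pvFindConnectedNodes dag target))))
      = dag.map id := List.map_congr_left hmap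
    _ = dag := List.map_id dag

-- ===== VERDICT (by name: the statement is the Claim_ definition above) =====
theorem remove_unconnected_nodes_spec : Claim_equal_remove_unconnected_nodes := by
  intro dag target hdom hpre
  obtain ⟨hnd, hpt⟩ := hpre
  unfold Spec_remove_unconnected_nodes
  cases target with
  | none =>
    simp only [remove_unconnected_nodes_alt]
    exact pvA_falsy hnd (Or.inl rfl)
  | some s =>
    by_cases hs : s = ""
    · subst hs
      simp only [remove_unconnected_nodes_alt]
      exact pvA_falsy hnd (Or.inr rfl)
    · have ht : s ∈ dag.map Prod.fst := by
        rcases hpt with h | h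
        · exact absurd (by simpa using h) hs
        · simpa using h
      simp only [remove_unconnected_nodes_alt, if_neg hs]
      simp only [remove_unconnected_nodes]
      have hmem : ∀ x, (x ∈ dag.map Prod.fst ∨ x ∈ dag.flatMap (fun kv => kv.2)) →
          ((x ∈ pvFindConnectedNodes dag (some s)) ↔ (x ∈ pvBfsB dag (pvFuel dag) PySem.Set.empty [s])) := by
        intro x hinv
        rw [pv_findConnected_some hs ht, pv_memB_iff]
        exact ⟨fun h => h.1, fun h => ⟨h, hinv⟩⟩
      have hfilter : dag.filter (fun kv => decide (kv.1 ∈ pvFindConnectedNodes dag (some s)))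
          = dag.filter (fun kv => decide (kv.1 ∈ pvBfsB dag (pvFuel dag) PySem.Set.empty [s])) := by
        apply List.filter_congr
        intro kv hkv
        simp only [decide_eq_decide]
        exact hmem kv.1 (Or.inl (List.mem_map.mpr ⟨kv, hkv, rfl⟩))
      rw [hfilter]
      apply List.map_congr_left
      intro kv hkv
      have hkvdag : kv ∈ dag := (List.mem_filter.mp hkv).1
      have : kv.2.filter (fun c => decide (c ∈ pvFindConnectedNodes dag (some s)))
          = kv.2.filter (fun c => decide (c ∈ pvBfsB dag (pvFuel dag) PySem.Set.empty [s])) := by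
        apply List.filter_congr
        intro c hc
        simp only [decide_eq_decide]
        exact hmem c (Or.inr (List.mem_flatMap.mpr ⟨kv, hkvdag, hc⟩))
      rw [this]
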